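-- pv_equiv track=rewrite | github.com/InternityFoundation/DS-A_SachinHegde | problems/10th june/chefandstring.py | team
-- ===== SOURCE A (Python) =====
-- def team(x):
--     i=0
--     count=0
--     while(i<len(x)-1):
--         if(x[i]!=x[i+1]):
--             count+=1
--             i=i+2
--         else:
--             i=i+1
--     return count
-- ===== SOURCE B (Python) =====
-- def team(x):
--     # pass 1: run-length encode x into the list of run lengths
--     lengths = []
--     run = 0
--     prev = ''
--     for c in x:
--         if run > 0 and c == prev:
--             run += 1
--         else:
--             if run > 0:
--                 lengths.append(run)
--             run = 1
--             prev = c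
--     if run > 0:
--         lengths.append(run)
--     # pass 2: count pairs at the run level: each counted pair uses the tail of
--     # the current run plus one char of run j; run j is fully consumed iff its
--     # length is 1, in which case the next partner run is j+2 instead of j+1
--     count = 0
--     j = 1
--     while j < len(lengths):
--         count += 1
--         j += 2 if lengths[j] == 1 else 1
--     return count
-- ===== Notes on version B (the rewrite author's own statement) =====
-- stated objective: alternative
-- what changed: B first run-length encodes the string into a list of run lengths and then counts pairs purely at the run level (each counted pair consumes the tail of the current run plus one character of the partner run, which is skipped entirely iff its length is 1), whereas A walks the characters with +1/+2 index jumps.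
import Mathlib
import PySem

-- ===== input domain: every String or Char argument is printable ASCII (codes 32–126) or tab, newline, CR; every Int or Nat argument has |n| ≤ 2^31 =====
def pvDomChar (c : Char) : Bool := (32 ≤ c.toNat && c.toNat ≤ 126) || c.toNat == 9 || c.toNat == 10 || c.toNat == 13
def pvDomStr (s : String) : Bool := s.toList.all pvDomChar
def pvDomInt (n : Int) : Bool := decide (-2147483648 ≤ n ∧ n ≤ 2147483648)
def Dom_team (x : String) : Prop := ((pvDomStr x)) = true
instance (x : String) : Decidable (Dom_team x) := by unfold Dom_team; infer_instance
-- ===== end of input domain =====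

-- B run-length encodes the string and counts differing pairs at the run level
-- (objective: alternative decomposition, same O(n) cost).


-- ===== PORT A =====
-- while(i < len(x)-1): if x[i] != x[i+1]: count += 1; i += 2 else: i += 1
def teamLoop (l : List Char) (i : Nat) (count : Int) : Int :=
  if h : i + 1 < l.length then
    if l[i]! ≠ l[i + 1]! then teamLoop l (i + 2) (count + 1)
    else teamLoop l (i + 1) count
  else count
termination_by l.length - i

def team (x : String) : Int := teamLoop x.toList 0 0

-- ===== PORT B =====
-- pass 1: for c in x: if run > 0 and c == prev: run += 1
--         else: (if run > 0: lengths.append(run)); run = 1; prev = c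
-- then: if run > 0: lengths.append(run)
def rleStep (s : List Int × Int × Char) (c : Char) : List Int × Int × Char :=
  if s.2.1 > 0 ∧ c = s.2.2 then (s.1, s.2.1 + 1, s.2.2)
  else ((if s.2.1 > 0 then s.1 ++ [s.2.1] else s.1), 1, c)

def rleFinish (s : List Int × Int × Char) : List Int :=
  if s.2.1 > 0 then s.1 ++ [s.2.1] else s.1

-- pass 2: j = 1; while j < len(lengths): count += 1; j += 2 if lengths[j] == 1 else 1
def runCountLoop (lengths : List Int) (j : Nat) (count : Int) : Int :=
  if h : j < lengths.length then
    runCountLoop lengths (if lengths[j]! = 1 then j + 2 else j + 1) (count + 1)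
  else count
termination_by lengths.length - j
decreasing_by split <;> omega

def team_alt (x : String) : Int :=
  runCountLoop (rleFinish (x.toList.foldl rleStep ([], 0, default))) 1 0

-- ===== PRECONDITION & SPEC =====
def Spec_team (x : String) (out : Int) : Prop := out = team_alt x
instance (x : String) (out : Int) : Decidable (Spec_team x out) := by unfold Spec_team; infer_instance

-- ===== CLAIM (what is proved, stated in full; the proofs are below) =====
def Claim_equal_team : Prop := ∀ (x : String), Dom_team x → Spec_team x (team x)

-- ===== LEMMAS AND PROOFS =====

-- greedy count of differing adjacent pairs, as list recursion (common value of both ports)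
def gcount : List Char → Int
  | [] => 0
  | [_] => 0
  | a :: b :: t => if a ≠ b then 1 + gcount t else gcount (b :: t)

-- run-level greedy count: ignores its head; partner run k2 is consumed fully iff k2 = 1
def g : List Int → Int
  | [] => 0
  | [_] => 0
  | _ :: k2 :: rest => 1 + (if k2 = 1 then g rest else g ((k2 - 1) :: rest))
termination_by l => l.length

-- run lengths of (replicate run prev ++ l), i.e. the list B's pass 1 produces
def runsFrom (prev : Char) (run : Int) : List Char → List Int
  | [] => [run]
  | c :: t => if c = prev then runsFrom prev (run + 1) t else run :: runsFrom c 1 t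

theorem gcount_small (l : List Char) (h : l.length ≤ 1) : gcount l = 0 := by
  match l with
  | [] => rfl
  | [_] => rfl
  | _ :: _ :: _ => simp at h

theorem g_small (l : List Int) (h : l.length ≤ 1) : g l = 0 := by
  match l with
  | [] => simp [g]
  | [_] => simp [g]
  | _ :: _ :: _ => simp at h

theorem g_head_irrel (a b : Int) (t : List Int) : g (a :: t) = g (b :: t) := by
  match t with
  | [] => simp [g]
  | k :: rest => simp [g]

theorem teamLoop_eq (n : Nat) : ∀ (l : List Char) (i : Nat) (c : Int),
    l.length - i ≤ n → teamLoop l i c = c + gcount (l.drop i) := by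
  induction n with
  | zero =>
    intro l i c hn
    rw [teamLoop]
    have hle : l.length ≤ i := by omega
    rw [dif_neg (by omega)]
    rw [List.drop_eq_nil_of_le hle]
    simp [gcount]
  | succ n ih =>
    intro l i c hn
    rw [teamLoop]
    by_cases h : i + 1 < l.length
    · rw [dif_pos h]
      have hi : i < l.length := by omega
      have hdrop : l.drop i = l[i] :: l[i + 1] :: l.drop (i + 2) := by
        rw [List.drop_eq_getElem_cons hi, List.drop_eq_getElem_cons h]
      have e1 : l[i]! = l[i] := getElem!_pos l i hi
      have e2 : l[i + 1]! = l[i + 1] := getElem!_pos l (i + 1) h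
      rw [e1, e2, hdrop]
      by_cases hne : l[i] = l[i + 1]
      · rw [if_neg (by simp [hne])]
        rw [ih l (i + 1) c (by omega)]
        rw [List.drop_eq_getElem_cons h]
        simp [gcount, hne]
      · rw [if_pos (by simp [hne])]
        rw [ih l (i + 2) (c + 1) (by omega)]
        simp [gcount, hne]
        ring
    · rw [dif_neg h]
      have : (l.drop i).length ≤ 1 := by simp; omega
      rw [gcount_small _ this]
      ring

-- pass-1 invariant: with an open run (run > 0), the fold finishes to lengths ++ runsFrom prev run rest
theorem rle_invariant : ∀ (l : List Char) (lengths : List Int) (run : Int) (prev : Char),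
    0 < run → rleFinish (l.foldl rleStep (lengths, run, prev)) = lengths ++ runsFrom prev run l := by
  intro l
  induction l with
  | nil => intro lengths run prev h; simp [rleFinish, runsFrom, if_pos h]
  | cons c t ih =>
    intro lengths run prev h
    simp only [List.foldl_cons]
    by_cases hc : c = prev
    · rw [show rleStep (lengths, run, prev) c = (lengths, run + 1, prev) by
        simp [rleStep, h, hc]]
      rw [ih lengths (run + 1) prev (by omega)]
      simp [runsFrom, hc]
    · rw [show rleStep (lengths, run, prev) c = (lengths ++ [run], 1, c) by
        simp [rleStep, hc, if_pos h]]
      rw [ih (lengths ++ [run]) 1 c (by omega)]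
      simp [runsFrom, hc]

theorem runsFrom_head : ∀ (l : List Char) (prev : Char) (r : Int),
    ∃ k ks, runsFrom prev r l = k :: ks ∧ r ≤ k := by
  intro l
  induction l with
  | nil => intro prev r; exact ⟨r, [], rfl, le_refl r⟩
  | cons c t ih =>
    intro prev r
    by_cases hc : c = prev
    · obtain ⟨k, ks, he, hk⟩ := ih prev (r + 1)
      exact ⟨k, ks, by simp [runsFrom, hc, he], by omega⟩
    · exact ⟨r, runsFrom c 1 t, by simp [runsFrom, hc], le_refl r⟩

theorem runsFrom_shift : ∀ (l : List Char) (prev : Char) (r s : Int),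
    ∀ k ks, runsFrom prev r l = k :: ks → runsFrom prev (r + s) l = (k + s) :: ks := by
  intro l
  induction l with
  | nil =>
    intro prev r s k ks he
    simp only [runsFrom] at he ⊢
    cases he; rfl
  | cons c t ih =>
    intro prev r s k ks he
    by_cases hc : c = prev
    · simp only [runsFrom, if_pos hc] at he ⊢
      have := ih prev (r + 1) s k ks he
      rw [show r + s + 1 = r + 1 + s by ring]
      exact this
    · simp only [runsFrom, if_neg hc] at he ⊢
      cases he; rfl

-- run-level count equals character-level greedy count
theorem g_runsFrom (n : Nat) : ∀ (l : List Char), l.length ≤ n → ∀ (prev : Char) (r : Int),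
    g (runsFrom prev r l) = gcount (prev :: l) := by
  induction n with
  | zero =>
    intro l hn prev r
    have : l = [] := List.eq_nil_of_length_eq_zero (by omega)
    subst this
    simp [runsFrom, g, gcount]
  | succ n ih =>
    intro l hn prev r
    match l with
    | [] => simp [runsFrom, g, gcount]
    | c :: t =>
      by_cases hc : c = prev
      · rw [show runsFrom prev r (c :: t) = runsFrom prev (r + 1) t by
          simp [runsFrom, hc]]
        rw [ih t (by simp at hn; omega) prev (r + 1)]
        subst hc
        simp [gcount]
      · rw [show runsFrom prev r (c :: t) = r :: runsFrom c 1 t by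
          simp [runsFrom, hc]]
        match t with
        | [] =>
          simp [runsFrom, g, gcount, Ne.symm hc]
        | d :: u =>
          by_cases hd : d = c
          · obtain ⟨k, ks, he, hk⟩ := runsFrom_head u c 1
            have hshift : runsFrom c 2 u = (k + 1) :: ks := by
              have h2 := runsFrom_shift u c 1 1 k ks he
              norm_num at h2
              exact h2
            rw [show runsFrom c 1 (d :: u) = (k + 1) :: ks by
              simp only [runsFrom, if_pos hd]
              norm_num [hshift]]
            rw [show g (r :: (k + 1) :: ks) = 1 + g (k :: ks) by
              simp [g, show k + 1 ≠ (1 : Int) by omega]]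
            rw [← he, ih u (by simp at hn; omega) c 1]
            have hpc : prev ≠ c := fun hh => hc hh.symm
            subst hd
            simp [gcount, hpc]
          · rw [show runsFrom c 1 (d :: u) = 1 :: runsFrom d 1 u by
              simp [runsFrom, hd]]
            rw [show g (r :: 1 :: runsFrom d 1 u) = 1 + g (runsFrom d 1 u) by simp [g]]
            rw [ih u (by simp at hn; omega) d 1]
            have hpc : prev ≠ c := fun hh => hc hh.symm
            simp [gcount, hpc]

theorem runCountLoop_eq (n : Nat) : ∀ (lengths : List Int) (j : Nat) (count : Int),
    lengths.length - j ≤ n → 1 ≤ j →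
    runCountLoop lengths j count = count + g (lengths.drop (j - 1)) := by
  induction n with
  | zero =>
    intro lengths j count hn hj
    rw [runCountLoop, dif_neg (by omega)]
    rw [g_small _ (by simp; omega)]
    ring
  | succ n ih =>
    intro lengths j count hn hj
    rw [runCountLoop]
    by_cases h : j < lengths.length
    · rw [dif_pos h]
      have hj1 : j - 1 < lengths.length := by omega
      have hdrop : lengths.drop (j - 1) = lengths[j - 1] :: lengths[j] :: lengths.drop (j + 1) := by
        rw [List.drop_eq_getElem_cons hj1, show j - 1 + 1 = j by omega,
          List.drop_eq_getElem_cons h]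
      have e : lengths[j]! = lengths[j] := getElem!_pos lengths j h
      rw [e, hdrop]
      by_cases h1 : lengths[j] = 1
      · rw [if_pos h1, ih lengths (j + 2) (count + 1) (by omega) (by omega)]
        rw [show j + 2 - 1 = j + 1 by omega]
        rw [show g (lengths[j - 1] :: lengths[j] :: lengths.drop (j + 1))
            = 1 + g (lengths.drop (j + 1)) by simp only [g]; rw [if_pos h1]]
        ring
      · rw [if_neg h1, ih lengths (j + 1) (count + 1) (by omega) (by omega)]
        rw [show j + 1 - 1 = j by omega, List.drop_eq_getElem_cons h]
        rw [show g (lengths[j - 1] :: lengths[j] :: lengths.drop (j + 1))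
            = 1 + g ((lengths[j] - 1) :: lengths.drop (j + 1)) by simp only [g]; rw [if_neg h1]]
        rw [g_head_irrel (lengths[j]) (lengths[j] - 1) (lengths.drop (j + 1))]
        ring
    · rw [dif_neg h]
      rw [g_small _ (by simp; omega)]
      ring

-- ===== VERDICT (by name: the statement is the Claim_ definition above) =====
theorem team_spec : Claim_equal_team := by
  intro x _
  unfold Spec_team team team_alt
  rw [teamLoop_eq x.toList.length x.toList 0 0 (by omega)]
  match hl : x.toList with
  | [] =>
    simp only [List.foldl_nil]
    rw [show rleFinish ([], (0 : Int), (default : Char)) = [] by simp [rleFinish]]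
    rw [runCountLoop, dif_neg (by simp)]
    simp [gcount]
  | c :: t =>
    simp only [List.foldl_cons]
    rw [show rleStep ([], (0 : Int), (default : Char)) c = ([], 1, c) by simp [rleStep]]
    rw [rle_invariant t [] 1 c (by omega)]
    simp only [List.nil_append]
    rw [runCountLoop_eq (runsFrom c 1 t).length (runsFrom c 1 t) 1 0 (by omega) (by omega)]
    simp only [List.drop_zero, Nat.sub_self]
    rw [g_runsFrom t.length t (le_refl _) c 1]
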